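-- pv_equiv track=rewrite | github.com/harini18122005/Competitive-programming | week-2/day-4/Maximum score subarray.py | pairWithMaxSum
-- ===== SOURCE A (Python) =====
-- def pairWithMaxSum(arr):
--     n = len(arr)
--     max_score = 0
--
--     for i in range(n):
--         for j in range(i + 1, n):
--             subarray = arr[i:j + 1]
--             if len(subarray) < 2:
--                 continue
--
--             min1, min2 = float('inf'), float('inf')
--             for num in subarray:
--                 if num < min1:
--                     min2 = min1
--                     min1 = num
--                 elif num < min2:
--                     min2 = num
--
--             score = min1 + min2
--             max_score = max(max_score, score)
--
--     return max_score
-- ===== SOURCE B (Python) =====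
-- def pairWithMaxSum(arr):
--     best = 0
--     for x, y in zip(arr, arr[1:]):
--         s = x + y
--         if s > best:
--             best = s
--     return best
-- ===== Notes on version B (the rewrite author's own statement) =====
-- stated objective: faster
-- what changed: Replaced the O(n^3) enumeration of all subarrays with an inner two-minimum scan by a single pass over adjacent pairs: the two smallest of any subarray sum to at most some adjacent pair's sum, and each adjacent pair is itself a subarray, so the answer is max(0, max adjacent pair sum).
import Mathlib
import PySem

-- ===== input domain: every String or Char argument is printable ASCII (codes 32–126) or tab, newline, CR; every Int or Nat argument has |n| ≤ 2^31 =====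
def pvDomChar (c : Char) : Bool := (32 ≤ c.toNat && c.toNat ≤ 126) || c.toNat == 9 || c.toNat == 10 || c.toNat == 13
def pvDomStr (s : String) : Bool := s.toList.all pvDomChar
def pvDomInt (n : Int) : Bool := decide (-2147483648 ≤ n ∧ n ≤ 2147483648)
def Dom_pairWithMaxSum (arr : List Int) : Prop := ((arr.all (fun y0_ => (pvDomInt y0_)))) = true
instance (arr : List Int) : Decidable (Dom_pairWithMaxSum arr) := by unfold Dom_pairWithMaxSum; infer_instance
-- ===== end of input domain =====

-- B replaces A's O(n^3) subarray enumeration by one pass over adjacent pairs (objective: faster).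

-- ===== PORT A =====
-- float('inf') is modelled as `none` (Option Int): `num < inf` is always true; exact here since
-- the compared values are the list's ints, which are never infinite.
def pvTwoMinStep (st : Option Int × Option Int) (num : Int) : Option Int × Option Int :=
  match st with
  | (none, _) => (some num, none)        -- num < min1(=inf): min2 := min1(=inf); min1 := num
  | (some a, m2) =>
    if num < a then (some num, some a)
    else
      match m2 with
      | none => (some a, some num)       -- num < min2(=inf)
      | some b => if num < b then (some a, some num) else (some a, some b)

def pairWithMaxSum (arr : List Int) : Int :=
  let n : Int := PySem.List.len arr
  (PySem.List.pyRange 0 n 1).foldl (fun max_score i =>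
    (PySem.List.pyRange (i + 1) n 1).foldl (fun max_score j =>
      let subarray := PySem.List.slice arr (some i) (some (j + 1))
      if PySem.List.len subarray < 2 then max_score
      else
        let st := subarray.foldl pvTwoMinStep (none, none)
        -- both minima are `some` here: subarray has ≥ 2 elements, so `getD 0` is never used
        let score := st.1.getD 0 + st.2.getD 0
        max max_score score) max_score) 0

-- ===== PORT B =====
def pairWithMaxSum_alt (arr : List Int) : Int :=
  (List.zip arr (PySem.List.slice arr (some 1) none)).foldl
    (fun best p => let s := p.1 + p.2; if s > best then s else best) 0

-- ===== PRECONDITION & SPEC =====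
def Spec_pairWithMaxSum (arr : List Int) (out : Int) : Prop := out = pairWithMaxSum_alt arr
instance (arr : List Int) (out : Int) : Decidable (Spec_pairWithMaxSum arr out) := by unfold Spec_pairWithMaxSum; infer_instance

-- ===== CLAIM (what is proved, stated in full; the proofs are below) =====
def Claim_equal_pairWithMaxSum : Prop := ∀ (arr : List Int), Dom_pairWithMaxSum arr → Spec_pairWithMaxSum arr (pairWithMaxSum arr)

-- ===== LEMMAS AND PROOFS =====

-- generic foldl/max facts ------------------------------------------------

/-- Upper bound for a fold whose body preserves being ≤ c. -/
theorem pvFoldLe {α : Type} (g : Int → α → Int) (c : Int) :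
    ∀ (l : List α) (init : Int), init ≤ c → (∀ s x, x ∈ l → s ≤ c → g s x ≤ c) →
      l.foldl g init ≤ c := by
  intro l
  induction l with
  | nil => intro init h _; simpa using h
  | cons a t ih =>
    intro init h hbody
    simp only [List.foldl_cons]
    exact ih _ (hbody init a (by simp) h) (fun s x hx hs => hbody s x (by simp [hx]) hs)

/-- The fold of a body that never decreases the state is ≥ the initial state. -/
theorem pvFoldGeInit {α : Type} (g : Int → α → Int) (hg : ∀ s x, s ≤ g s x) :
    ∀ (l : List α) (init : Int), init ≤ l.foldl g init := by
  intro l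
  induction l with
  | nil => intro init; simp
  | cons a t ih =>
    intro init
    simp only [List.foldl_cons]
    exact le_trans (hg init a) (ih _)

/-- If some element x of the list forces the state up to v, the fold is ≥ v. -/
theorem pvFoldGeAt {α : Type} (g : Int → α → Int) (hg : ∀ s x, s ≤ g s x) :
    ∀ (l : List α) (init : Int) (x : α), x ∈ l → ∀ v : Int, (∀ s, v ≤ g s x) →
      v ≤ l.foldl g init := by
  intro l
  induction l with
  | nil => intro init x hx; simp at hx
  | cons a t ih =>
    intro init x hx v hv
    simp only [List.foldl_cons]
    rcases List.mem_cons.mp hx with h | h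
    · subst h; exact le_trans (hv init) (pvFoldGeInit g hg t _)
    · exact ih _ x h v hv

-- the two-minimum scan ---------------------------------------------------

/-- Scanning more elements from a valid two-minimum state keeps min1 ≤ min2 and
    can only decrease the sum of the two minima. -/
theorem pvTwoMinBound :
    ∀ (l : List Int) (a b : Int), a ≤ b →
      ∃ a' b', l.foldl pvTwoMinStep (some a, some b) = (some a', some b') ∧
        a' ≤ b' ∧ a' + b' ≤ a + b := by
  intro l
  induction l with
  | nil => intro a b hab; exact ⟨a, b, rfl, hab, le_refl _⟩
  | cons x t ih =>
    intro a b hab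
    simp only [List.foldl_cons, pvTwoMinStep]
    by_cases h1 : x < a
    · simp only [if_pos h1]
      obtain ⟨a', b', he, h2, h3⟩ := ih x a (le_of_lt h1)
      exact ⟨a', b', he, h2, by omega⟩
    · simp only [if_neg h1]
      by_cases h2 : x < b
      · simp only [if_pos h2]
        obtain ⟨a', b', he, h3, h4⟩ := ih a x (by omega)
        exact ⟨a', b', he, h3, by omega⟩
      · simp only [if_neg h2]
        obtain ⟨a', b', he, h3, h4⟩ := ih a b hab
        exact ⟨a', b', he, h3, h4⟩

/-- The score A computes on a list x :: y :: rest is at most x + y. -/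
theorem pvScoreLe (x y : Int) (rest : List Int) :
    (((x :: y :: rest).foldl pvTwoMinStep (none, none)).1.getD 0 +
     ((x :: y :: rest).foldl pvTwoMinStep (none, none)).2.getD 0) ≤ x + y := by
  simp only [List.foldl_cons, pvTwoMinStep]
  by_cases h : y < x
  · simp only [if_pos h]
    obtain ⟨a', b', he, h2, h3⟩ := pvTwoMinBound rest y x (le_of_lt h)
    rw [he]; simpa using by omega
  · simp only [if_neg h]
    obtain ⟨a', b', he, h2, h3⟩ := pvTwoMinBound rest x y (by omega)
    rw [he]; simpa using by omega

/-- On exactly a pair the score is x + y. -/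
theorem pvScorePair (x y : Int) :
    (([x, y].foldl pvTwoMinStep (none, none)).1.getD 0 +
     ([x, y].foldl pvTwoMinStep (none, none)).2.getD 0) = x + y := by
  simp only [List.foldl_cons, List.foldl_nil, pvTwoMinStep]
  by_cases h : y < x
  · simp [if_pos h]; omega
  · simp [if_neg h]

-- shape of the sliced subarray -------------------------------------------

/-- For 0 ≤ i = k, k+1 ≤ j < |arr|, the slice arr[i : j+1] starts with arr[k], arr[k+1]. -/
theorem pvSliceShape (arr : List Int) (k : Nat) (j : Int)
    (hk1 : (k : Int) + 1 ≤ j) (hj : j < (arr.length : Int)) :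
    ∃ (hk : k + 1 < arr.length) (rest : List Int),
      PySem.List.slice arr (some (k : Int)) (some (j + 1)) =
        arr[k]'(by omega) :: arr[k + 1]'hk :: rest := by
  have hk2 : k + 1 < arr.length := by omega
  refine ⟨hk2, ((arr.drop (k + 2)).take ((j + 1).toNat - k - 2)), ?_⟩
  rw [PySem.List.slice_toNat arr (by positivity) (by omega)]
  simp only [Int.toNat_natCast]
  have hcnt : (j + 1).toNat - k = ((j + 1).toNat - k - 2) + 1 + 1 := by omega
  rw [hcnt]
  rw [List.drop_eq_getElem_cons (show k < arr.length by omega)]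
  rw [List.drop_eq_getElem_cons hk2]
  simp only [List.take_succ_cons]
  have h2 : (j + 1).toNat - k - 2 + 1 + 1 - 2 = (j + 1).toNat - k - 2 := by omega
  rw [h2]

-- characterising B's pair list -------------------------------------------

theorem pvZipTail (arr : List Int) :
    PySem.List.slice arr (some 1) none = arr.tail := PySem.List.slice_from_one arr

theorem pvMemZip (arr : List Int) (p : Int × Int) (hp : p ∈ List.zip arr arr.tail) :
    ∃ k : Nat, ∃ hk : k + 1 < arr.length, p = (arr[k]'(by omega), arr[k + 1]'hk) := by
  obtain ⟨k, hk, he⟩ := List.mem_iff_getElem.mp hp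
  have hlen : (List.zip arr arr.tail).length = arr.length - 1 := by
    simp [List.length_zip, List.length_tail]
  have hk1 : k + 1 < arr.length := by omega
  refine ⟨k, hk1, ?_⟩
  rw [← he, List.getElem_zip, List.getElem_tail]

theorem pvZipGet (arr : List Int) (k : Nat) (hk : k + 1 < arr.length) :
    (arr[k]'(by omega), arr[k + 1]'hk) ∈ List.zip arr arr.tail := by
  have hlen : k < (List.zip arr arr.tail).length := by
    simp [List.length_zip, List.length_tail]; omega
  have : (List.zip arr arr.tail)[k]'hlen = (arr[k]'(by omega), arr[k + 1]'hk) := by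
    rw [List.getElem_zip, List.getElem_tail]
  exact this ▸ List.getElem_mem hlen

-- B's fold body never decreases the state
theorem pvBodyBGe (s : Int) (p : Int × Int) :
    s ≤ (let t := p.1 + p.2; if t > s then t else s) := by
  dsimp only; split <;> omega

-- every adjacent-pair sum is ≤ B's result, and B's result ≥ 0
theorem pvAdjLeB (arr : List Int) (k : Nat) (hk : k + 1 < arr.length) :
    arr[k]'(by omega) + arr[k + 1]'hk ≤ pairWithMaxSum_alt arr := by
  unfold pairWithMaxSum_alt
  rw [pvZipTail]
  exact pvFoldGeAt _ pvBodyBGe _ 0 _ (pvZipGet arr k hk) _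
    (fun s => by dsimp only; split <;> omega)

theorem pvBNonneg (arr : List Int) : 0 ≤ pairWithMaxSum_alt arr := by
  unfold pairWithMaxSum_alt
  exact pvFoldGeInit _ pvBodyBGe _ 0

-- A's inner/outer fold bodies never decrease the state
theorem pvBodyAInnerGe (arr : List Int) (s i j : Int) :
    s ≤ (let subarray := PySem.List.slice arr (some i) (some (j + 1));
      if PySem.List.len subarray < 2 then s
      else
        let st := subarray.foldl pvTwoMinStep (none, none)
        max s (st.1.getD 0 + st.2.getD 0)) := by
  dsimp only; split
  · exact le_refl _
  · exact le_max_left _ _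

-- A ≤ B -------------------------------------------------------------------

theorem pvALeB (arr : List Int) : pairWithMaxSum arr ≤ pairWithMaxSum_alt arr := by
  unfold pairWithMaxSum
  apply pvFoldLe _ _ _ _ (pvBNonneg arr)
  intro s i hi hs
  have hi' := (PySem.List.mem_pyRange_one).mp hi
  apply pvFoldLe _ _ _ _ hs
  intro t j hj ht
  have hj' := (PySem.List.mem_pyRange_one).mp hj
  dsimp only
  split
  · exact ht
  · -- valid pair: bound the score by arr[k] + arr[k+1] ≤ B
    obtain ⟨k, hk⟩ : ∃ k : Nat, (k : Int) = i := ⟨i.toNat, Int.toNat_of_nonneg (by omega)⟩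
    obtain ⟨hklen, rest, hshape⟩ := pvSliceShape arr k j (by omega) (by
      simpa [PySem.List.len_eq] using hj'.2)
    rw [hk] at hshape
    apply max_le ht
    calc _ ≤ arr[k]'(by omega) + arr[k + 1]'hklen := by
            rw [hshape]; exact pvScoreLe _ _ _
      _ ≤ pairWithMaxSum_alt arr := pvAdjLeB arr k hklen

-- B ≤ A -------------------------------------------------------------------

theorem pvANonneg (arr : List Int) : 0 ≤ pairWithMaxSum arr := by
  unfold pairWithMaxSum
  exact pvFoldGeInit _ (fun s i => pvFoldGeInit _ (fun t j => pvBodyAInnerGe arr t i j) _ s) _ 0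

/-- Each adjacent-pair sum arr[k] + arr[k+1] is attained by A at (i, j) = (k, k+1). -/
theorem pvAdjLeA (arr : List Int) (k : Nat) (hk : k + 1 < arr.length) :
    arr[k]'(by omega) + arr[k + 1]'hk ≤ pairWithMaxSum arr := by
  unfold pairWithMaxSum
  apply pvFoldGeAt _ (fun s i => pvFoldGeInit _ (fun t j => pvBodyAInnerGe arr t i j) _ s)
    _ 0 (k : Int)
    (PySem.List.mem_pyRange_one.mpr (by simp [PySem.List.len_eq]; omega))
  intro s
  apply pvFoldGeAt _ (fun t j => pvBodyAInnerGe arr t (k : Int) j) _ s ((k : Int) + 1)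
    (PySem.List.mem_pyRange_one.mpr (by simp [PySem.List.len_eq]; omega))
  intro t
  obtain ⟨hklen, rest, hshape⟩ := pvSliceShape arr k ((k : Int) + 1) (le_refl _) (by omega)
  have hrest : rest = [] := by
    have := congrArg List.length hshape
    rw [PySem.List.length_slice] at this
    simp only [List.length_cons] at this
    have hc1 : PySem.List.clampIdx arr.length ((k : Int) + 1 + 1) = min (k + 2) arr.length := by
      rw [show ((k : Int) + 1 + 1) = ((k + 2 : Nat) : Int) by push_cast; ring,
        PySem.List.clampIdx_natCast]
    have hc2 : PySem.List.clampIdx arr.length ((k : Nat) : Int) = min k arr.length :=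
      PySem.List.clampIdx_natCast arr.length k
    rw [hc1, hc2] at this
    have hr0 : rest.length = 0 := by omega
    exact List.eq_nil_of_length_eq_zero hr0
  dsimp only
  rw [hshape, hrest]
  split
  · rename_i hlt
    simp [PySem.List.len_eq] at hlt
  · rw [pvScorePair]
    exact le_max_right _ _

theorem pvBLeA (arr : List Int) : pairWithMaxSum_alt arr ≤ pairWithMaxSum arr := by
  unfold pairWithMaxSum_alt
  rw [pvZipTail]
  apply pvFoldLe _ _ _ _ (pvANonneg arr)
  intro s p hp hs
  obtain ⟨k, hk, hpe⟩ := pvMemZip arr p hp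
  dsimp only; split
  · rw [hpe]; exact pvAdjLeA arr k hk
  · exact hs

-- ===== VERDICT (by name: the statement is the Claim_ definition above) =====
theorem pairWithMaxSum_spec : Claim_equal_pairWithMaxSum := by
  intro arr _
  unfold Spec_pairWithMaxSum
  exact le_antisymm (pvALeB arr) (pvBLeA arr)
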